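-- pv_equiv track=rewrite | github.com/dsconnelly/ezra | apicode/query.py | biggest_number_in_string
-- ===== SOURCE A (Python) =====
-- def biggest_number_in_string(s):
--     """Given a string, finds the largest number present. Useful for trying
--     to parse user searches."""
--     numbers = []
--     i = 0
--     in_number = False
--     for j, c in enumerate(s):
--         if not in_number:
--             if c.isdigit():
--                 i = j
--                 in_number = True
--         else:
--             if not c.isdigit():
--                 numbers.append(int(s[i:j]))
--                 in_number = False
--     if in_number:
--         numbers.append(int(s[i:]))
--     try:
--         return str(max(numbers))
--     except ValueError:
--         return None
-- ===== SOURCE B (Python) =====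
-- def biggest_number_in_string(s):
--     """Given a string, finds the largest number present. Useful for trying
--     to parse user searches."""
--     parts = ''.join(c if c.isdigit() else ' ' for c in s).split()
--     if not parts:
--         return None
--     return str(max(int(p) for p in parts))
-- ===== Notes on version B (the rewrite author's own statement) =====
-- stated objective: idiomatic
-- what changed: Replaces A's explicit state machine (in_number flag, start index, trailing flush) by mapping every non-digit character to a space and letting str.split() do the run segmentation, then taking the max of the parsed runs.
import Mathlib
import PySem

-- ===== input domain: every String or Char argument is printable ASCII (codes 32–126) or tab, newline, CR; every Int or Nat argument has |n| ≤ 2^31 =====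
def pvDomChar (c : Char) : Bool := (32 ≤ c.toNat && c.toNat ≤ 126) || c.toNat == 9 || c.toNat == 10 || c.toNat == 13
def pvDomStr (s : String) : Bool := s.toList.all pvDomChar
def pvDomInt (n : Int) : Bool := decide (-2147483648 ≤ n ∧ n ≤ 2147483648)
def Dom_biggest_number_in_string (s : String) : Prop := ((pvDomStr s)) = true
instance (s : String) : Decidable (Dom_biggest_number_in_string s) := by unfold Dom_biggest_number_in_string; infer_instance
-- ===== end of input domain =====

-- B replaces A's in_number/start-index state machine by mapping non-digits to spaces and
-- letting split() segment the digit runs (idiomatic, same cost).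

-- ===== PORT A =====
-- int(s[i:j]) on a digit run never raises (on the ASCII domain), so `.getD 0` is unreachable.
def pvStepA (cs : List Char) (st : List Int × Int × Bool) (jc : Int × Char) : List Int × Int × Bool :=
  match st, jc with
  | (numbers, i, inNumber), (j, c) =>
    if inNumber = false then
      if PySem.Chars.isdigit c then (numbers, j, true) else (numbers, i, inNumber)
    else
      if PySem.Chars.isdigit c = false then
        (numbers ++ [(PySem.Int.ofChars? (PySem.List.slice cs (some i) (some j))).getD 0], i, false)
      else (numbers, i, inNumber)

def biggest_number_in_string (s : String) : Option String :=
  let cs := s.toList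
  let st := (PySem.List.enumerate cs 0).foldl (pvStepA cs) ([], 0, false)
  let numbers := if st.2.2 then
      st.1 ++ [(PySem.Int.ofChars? (PySem.List.slice cs (some st.2.1) none)).getD 0]
    else st.1
  match PySem.List.max? numbers (fun x => x) with
  | some m => some (PySem.Int.toStr m)
  | none => none

-- ===== PORT B =====
-- int(p) on a part (a digit run) never raises (on the ASCII domain), so `.getD 0` is unreachable.
def biggest_number_in_string_alt (s : String) : Option String :=
  let parts := PySem.Chars.split₀ (s.toList.map (fun c => if PySem.Chars.isdigit c then c else ' '))
  if parts = [] then none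
  else (PySem.List.max? (parts.map (fun p => (PySem.Int.ofChars? p).getD 0)) (fun x => x)).map PySem.Int.toStr

-- ===== PRECONDITION & SPEC =====
def Spec_biggest_number_in_string (s : String) (out : Option String) : Prop := out = biggest_number_in_string_alt s
instance (s : String) (out : Option String) : Decidable (Spec_biggest_number_in_string s out) := by unfold Spec_biggest_number_in_string; infer_instance

-- ===== CLAIM (what is proved, stated in full; the proofs are below) =====
def Claim_equal_biggest_number_in_string : Prop := ∀ (s : String), Dom_biggest_number_in_string s → Spec_biggest_number_in_string s (biggest_number_in_string s)

-- ===== LEMMAS AND PROOFS =====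

-- Reference run segmentation: `pvRuns cur t` is the list of maximal digit runs of `cur ++ t`
-- (cur = some r: a digit run in progress whose characters were already consumed).
def pvRuns (cur : Option (List Char)) : List Char → List (List Char)
  | [] => match cur with | none => [] | some r => [r]
  | c :: t =>
    if PySem.Chars.isdigit c then pvRuns (some (cur.getD [] ++ [c])) t
    else match cur with | none => pvRuns none t | some r => r :: pvRuns none t

def pvToInt (g : List Char) : Int := (PySem.Int.ofChars? g).getD 0

lemma pvStepA_false_digit (cs : List Char) (nums : List Int) (i j : Int) (c : Char)
    (hd : PySem.Chars.isdigit c = true) : pvStepA cs (nums, i, false) (j, c) = (nums, j, true) := by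
  simp [pvStepA, hd]

lemma pvStepA_false_nondigit (cs : List Char) (nums : List Int) (i j : Int) (c : Char)
    (hd : PySem.Chars.isdigit c = false) : pvStepA cs (nums, i, false) (j, c) = (nums, i, false) := by
  simp [pvStepA, hd]

lemma pvStepA_true_digit (cs : List Char) (nums : List Int) (i j : Int) (c : Char)
    (hd : PySem.Chars.isdigit c = true) : pvStepA cs (nums, i, true) (j, c) = (nums, i, true) := by
  simp [pvStepA, hd]

lemma pvStepA_true_nondigit (cs : List Char) (nums : List Int) (i j : Int) (c : Char)
    (hd : PySem.Chars.isdigit c = false) : pvStepA cs (nums, i, true) (j, c)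
      = (nums ++ [(PySem.Int.ofChars? (PySem.List.slice cs (some i) (some j))).getD 0], i, false) := by
  simp [pvStepA, hd]

lemma pv_isdigit_not_isspace (c : Char) (h : PySem.Chars.isdigit c = true) :
    PySem.Chars.isspace c = false := by
  have hb : 48 ≤ c.toNat ∧ c.toNat ≤ 57 := by
    simp only [PySem.Chars.isdigit, Bool.and_eq_true, decide_eq_true_eq, Char.le_def,
      UInt32.le_iff_toNat_le] at h
    exact h
  simp only [PySem.Chars.isspace]
  simp only [Bool.or_eq_false_iff, Bool.and_eq_false_iff, decide_eq_false_iff_not]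
  omega

-- split₀ on the mapped string computes exactly the digit runs.
lemma pv_go_map (t : List Char) : ∀ (r : List Char) (acc : List (List Char)),
    PySem.Chars.split₀.go (t.map (fun c => if PySem.Chars.isdigit c then c else ' ')) r acc
      = acc.reverse ++ pvRuns (if r.isEmpty then none else some r.reverse) t := by
  induction t with
  | nil =>
    intro r acc
    cases r with
    | nil => simp [PySem.Chars.split₀.go, pvRuns]
    | cons a as => simp [PySem.Chars.split₀.go, pvRuns]
  | cons c t ih =>
    intro r acc
    by_cases hd : PySem.Chars.isdigit c = true
    · simp only [List.map_cons, hd, if_pos, PySem.Chars.split₀.go,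
        pv_isdigit_not_isspace c hd]
      rw [ih (c :: r) acc]
      cases r <;> simp [pvRuns, hd]
    · have hs : PySem.Chars.isspace ' ' = true := by decide
      rw [List.map_cons, if_neg hd, PySem.Chars.split₀.go, if_pos hs]
      cases r with
      | nil => rw [ih [] acc]; simp [pvRuns, hd]
      | cons a as => rw [if_neg (by simp), ih [] ((a :: as).reverse :: acc)]; simp [pvRuns, hd]

lemma pv_split_map (t : List Char) :
    PySem.Chars.split₀ (t.map (fun c => if PySem.Chars.isdigit c then c else ' ')) = pvRuns none t := by
  have := pv_go_map t [] []
  simpa [PySem.Chars.split₀] using this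

-- A's loop with the trailing flush computes the digit runs of the remaining suffix, as ints.
lemma pv_A_loop (cs : List Char) (t : List Char) : ∀ (p₀ : List Char) (cur : Option (List Char))
    (nums : List Int) (i j : Int),
    cs = p₀ ++ cur.getD [] ++ t →
    (cur = none ∨ i = (p₀.length : Int)) →
    j = (p₀.length : Int) + ((cur.getD []).length : Int) →
    (let st := (PySem.List.enumerate t j).foldl (pvStepA cs) (nums, i, cur.isSome)
     if st.2.2 then st.1 ++ [pvToInt (PySem.List.slice cs (some st.2.1) none)] else st.1)
      = nums ++ (pvRuns cur t).map pvToInt := by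
  induction t with
  | nil =>
    intro p₀ cur nums i j hcs hi hj
    cases cur with
    | none => simp [PySem.List.enumerate, pvRuns]
    | some r =>
      rcases hi with hi | hi
      · exact absurd hi (by simp)
      subst hi
      simp only [PySem.List.enumerate, List.foldl_nil, Option.isSome_some, if_true]
      have : PySem.List.slice cs (some ((p₀.length : Nat) : Int)) none = r := by
        rw [PySem.List.slice_from_natCast]
        simp [hcs]
      simp [pvRuns, this]
  | cons c t ih =>
    intro p₀ cur nums i j hcs hi hj
    rw [PySem.List.enumerate_cons, List.foldl_cons]
    by_cases hd : PySem.Chars.isdigit c = true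
    · cases cur with
      | none =>
        have hj' : j = (p₀.length : Int) := by simpa using hj
        rw [show (Option.isSome (none : Option (List Char))) = false from rfl,
          pvStepA_false_digit cs nums i j c hd]
        have h2 := ih p₀ (some [c]) nums j (j + 1) (by simpa using hcs)
          (Or.inr hj')
          (by simp only [Option.getD_some, List.length_cons, List.length_nil]; omega)
        simp only [Option.isSome_some] at h2
        rw [h2]
        simp [pvRuns, hd]
      | some r =>
        rcases hi with hi | hi
        · exact absurd hi (by simp)
        subst hi
        rw [show (Option.isSome (some r)) = true from rfl,
          pvStepA_true_digit cs nums (p₀.length : Int) j c hd]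
        have h2 := ih p₀ (some (r ++ [c])) nums ((p₀.length : Int)) (j + 1)
          (by simpa using hcs) (Or.inr rfl)
          (by simp only [Option.getD_some, List.length_append, List.length_cons,
                List.length_nil] at hj ⊢; omega)
        simp only [Option.isSome_some] at h2
        rw [h2]
        simp [pvRuns, hd]
    · have hd' : PySem.Chars.isdigit c = false := by simpa using hd
      cases cur with
      | none =>
        rw [show (Option.isSome (none : Option (List Char))) = false from rfl,
          pvStepA_false_nondigit cs nums i j c hd']
        have h2 := ih (p₀ ++ [c]) none nums i (j + 1) (by simpa using hcs)
          (Or.inl rfl)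
          (by simp only [Option.getD_none, List.length_append, List.length_cons,
                List.length_nil] at hj ⊢; omega)
        simp only [Option.isSome_none] at h2
        rw [h2]
        simp [pvRuns, hd']
      | some r =>
        rcases hi with hi | hi
        · exact absurd hi (by simp)
        subst hi
        rw [show (Option.isSome (some r)) = true from rfl,
          pvStepA_true_nondigit cs nums (p₀.length : Int) j c hd']
        have hslice : PySem.List.slice cs (some ((p₀.length : Nat) : Int)) (some j) = r := by
          have hj2 : j = (((p₀.length + r.length : Nat)) : Int) := by
            simp only [Option.getD_some] at hj; push_cast; omega
          rw [hj2, PySem.List.slice_natCast]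
          simp [hcs]
        have h2 := ih (p₀ ++ r ++ [c]) none (nums ++ [pvToInt r]) ((p₀.length : Int)) (j + 1)
          (by simp [hcs]) (Or.inl rfl)
          (by simp only [Option.getD_some, Option.getD_none, List.length_append,
                List.length_cons, List.length_nil] at hj ⊢; omega)
        simp only [Option.isSome_none] at h2
        rw [hslice, show ((PySem.Int.ofChars? r).getD 0) = pvToInt r from rfl, h2]
        simp [pvRuns, hd', pvToInt]

lemma pv_numbers_eq (s : String) :
    (let st := (PySem.List.enumerate s.toList 0).foldl (pvStepA s.toList) ([], 0, false)
     if st.2.2 then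
        st.1 ++ [(PySem.Int.ofChars? (PySem.List.slice s.toList (some st.2.1) none)).getD 0]
      else st.1)
      = (pvRuns none s.toList).map pvToInt := by
  have := pv_A_loop s.toList s.toList [] none [] 0 0 (by simp) (Or.inl rfl) (by simp)
  simpa [pvToInt] using this

-- ===== VERDICT (by name: the statement is the Claim_ definition above) =====
theorem biggest_number_in_string_spec : Claim_equal_biggest_number_in_string := by
  intro s _
  unfold Spec_biggest_number_in_string biggest_number_in_string biggest_number_in_string_alt
  rw [pv_split_map s.toList]
  have hn := pv_numbers_eq s
  simp only at hn ⊢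
  rw [hn]
  have hfun : (fun p : List Char => (PySem.Int.ofChars? p).getD 0) = pvToInt := rfl
  rw [hfun]
  cases h : pvRuns none s.toList with
  | nil => simp [PySem.List.max?]
  | cons g gs =>
    rw [if_neg (by simp)]
    cases hm : PySem.List.max? ((g :: gs).map pvToInt) (fun x => x) with
    | none => simp [PySem.List.max?_eq_none_iff] at hm
    | some m => simp
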